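-- pv_equiv track=rewrite | github.com/hayabusagmail/ottolive | tv.py | replace_urls_in_tv_section
-- ===== SOURCE A (Python) =====
-- def replace_urls_in_tv_section(lines, tv_urls):
--     result = []
--     url_idx = 0
--     for line in lines:
--         if line.strip().startswith("http") and url_idx < len(tv_urls):
--             result.append(tv_urls[url_idx])
--             url_idx += 1
--         else:
--             result.append(line)
--     return result
-- ===== SOURCE B (Python) =====
-- def replace_urls_in_tv_section(lines, tv_urls):
--     positions = [i for i, line in enumerate(lines) if line.strip().startswith("http")]
--     result = list(lines)
--     for pos, url in zip(positions, tv_urls):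
--         result[pos] = url
--     return result
-- ===== Notes on version B (the rewrite author's own statement) =====
-- stated objective: alternative
-- what changed: Replaces A's single stateful scan (building the output line by line while counting consumed urls) by a two-phase decomposition: first collect the indices of http lines, then copy the input and overwrite positions paired with urls via zip, whose truncation at the shorter list reproduces A's cutoff.
import Mathlib
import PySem

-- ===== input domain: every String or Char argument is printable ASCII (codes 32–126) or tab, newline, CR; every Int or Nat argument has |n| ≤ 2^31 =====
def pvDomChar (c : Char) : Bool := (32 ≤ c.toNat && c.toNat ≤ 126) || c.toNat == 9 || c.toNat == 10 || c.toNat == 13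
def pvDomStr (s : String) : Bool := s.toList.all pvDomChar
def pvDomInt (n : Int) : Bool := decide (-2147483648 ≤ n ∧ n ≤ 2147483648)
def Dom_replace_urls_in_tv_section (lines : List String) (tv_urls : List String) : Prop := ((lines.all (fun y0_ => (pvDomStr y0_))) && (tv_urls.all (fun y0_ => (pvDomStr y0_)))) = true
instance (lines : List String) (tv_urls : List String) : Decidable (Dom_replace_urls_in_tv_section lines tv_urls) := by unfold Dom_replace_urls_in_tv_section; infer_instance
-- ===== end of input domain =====

-- B replaces A's single stateful scan (url_idx counter) by a two-phase decomposition: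
-- collect the indices of http lines, then overwrite a copy of the input at positions zipped with tv_urls.

-- ===== PORT A =====
-- single pass: accumulate result and the url index
def replace_urls_in_tv_section (lines : List String) (tv_urls : List String) : List String :=
  (lines.foldl (fun (st : List String × Int) line =>
    if PySem.Str.startswith (PySem.Str.strip line) "http" ∧ st.2 < (tv_urls.length : Int) then
      -- tv_urls[url_idx]: the guard ensures the index is in range, so getD never fires
      (st.1 ++ [(PySem.List.pyGet? tv_urls st.2).getD ""], st.2 + 1)
    else
      (st.1 ++ [line], st.2)) ([], 0)).1

-- ===== PORT B =====
def pvIsHttp (line : String) : Bool := PySem.Str.startswith (PySem.Str.strip line) "http"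

def pvHttpPositions (lines : List String) : List Int :=
  ((PySem.List.enumerate lines 0).filter (fun p => pvIsHttp p.2)).map (fun p => p.1)

def replace_urls_in_tv_section_alt (lines : List String) (tv_urls : List String) : List String :=
  -- result[pos] = url: pos comes from enumerate, hence a nonnegative in-range index, so List.set is exact
  ((pvHttpPositions lines).zip tv_urls).foldl (fun r pu => r.set pu.1.toNat pu.2) lines

-- ===== PRECONDITION & SPEC =====
def Spec_replace_urls_in_tv_section (lines : List String) (tv_urls : List String) (out : List String) : Prop := out = replace_urls_in_tv_section_alt lines tv_urls
instance (lines : List String) (tv_urls : List String) (out : List String) : Decidable (Spec_replace_urls_in_tv_section lines tv_urls out) := by unfold Spec_replace_urls_in_tv_section; infer_instance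

-- ===== CLAIM (what is proved, stated in full; the proofs are below) =====
def Claim_equal_replace_urls_in_tv_section : Prop := ∀ (lines : List String) (tv_urls : List String), Dom_replace_urls_in_tv_section lines tv_urls → Spec_replace_urls_in_tv_section lines tv_urls (replace_urls_in_tv_section lines tv_urls)

-- ===== LEMMAS AND PROOFS =====

-- common recursive reference: consume urls as a list while walking lines
def pvGo (tv_urls : List String) : List String → List String → List String
  | [], _ => []
  | l :: ls, us =>
    if pvIsHttp l then
      match us with
      | [] => l :: pvGo tv_urls ls []
      | u :: us' => u :: pvGo tv_urls ls us'
    else l :: pvGo tv_urls ls us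

lemma enumerate_shift {α : Type} (xs : List α) (s : Int) :
    PySem.List.enumerate xs (s + 1) = (PySem.List.enumerate xs s).map (fun p => (p.1 + 1, p.2)) := by
  induction xs generalizing s with
  | nil => simp [PySem.List.enumerate_nil]
  | cons x xs ih =>
    rw [PySem.List.enumerate_cons, PySem.List.enumerate_cons, List.map_cons,
      show s + 1 + 1 = (s + 1) + 1 by ring, ih]

lemma httpPositions_cons (l : String) (ls : List String) :
    pvHttpPositions (l :: ls) =
      (if pvIsHttp l then (0 : Int) :: (pvHttpPositions ls).map (fun p => p + 1)
       else (pvHttpPositions ls).map (fun p => p + 1)) := by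
  unfold pvHttpPositions
  rw [PySem.List.enumerate_cons, show (0 : Int) + 1 = 0 + 1 by ring, enumerate_shift]
  by_cases h : pvIsHttp l <;> simp [h, List.filter_map, Function.comp_def]

lemma httpPositions_nonneg (lines : List String) : ∀ p ∈ pvHttpPositions lines, 0 ≤ p := by
  intro p hp
  unfold pvHttpPositions at hp
  simp only [List.mem_map, List.mem_filter] at hp
  obtain ⟨q, ⟨hq, _⟩, rfl⟩ := hp
  rw [PySem.List.mem_enumerate_iff] at hq
  obtain ⟨k, hk, rfl⟩ := hq
  simp

lemma foldl_set_shift (pairs : List (Int × String)) (x : String) (xs : List String)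
    (hpos : ∀ q ∈ pairs, 0 ≤ q.1) :
    (pairs.map (fun q => (q.1 + 1, q.2))).foldl (fun r pu => r.set pu.1.toNat pu.2) (x :: xs)
      = x :: pairs.foldl (fun r pu => r.set pu.1.toNat pu.2) xs := by
  induction pairs generalizing xs with
  | nil => simp
  | cons q qs ih =>
    have hq : 0 ≤ q.1 := hpos q (List.mem_cons_self ..)
    have : (q.1 + 1).toNat = q.1.toNat + 1 := by omega
    simp only [List.map_cons, List.foldl_cons, this, List.set]
    exact ih _ (fun r hr => hpos r (List.mem_cons_of_mem _ hr))

lemma alt_eq_go (lines : List String) (tv_urls : List String) (us : List String) :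
    ((pvHttpPositions lines).zip us).foldl (fun r pu => r.set pu.1.toNat pu.2) lines
      = pvGo tv_urls lines us := by
  induction lines generalizing us with
  | nil => simp [pvHttpPositions, PySem.List.enumerate_nil, pvGo]
  | cons l ls ih =>
    rw [httpPositions_cons]
    have hshift : ∀ us' : List String,
        (((pvHttpPositions ls).map (fun p => p + 1)).zip us').foldl
            (fun r pu => r.set pu.1.toNat pu.2) (l :: ls)
          = l :: ((pvHttpPositions ls).zip us').foldl (fun r pu => r.set pu.1.toNat pu.2) ls := by
      intro us'
      rw [List.zip_map_left]
      have := foldl_set_shift ((pvHttpPositions ls).zip us') l ls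
        (fun q hq => httpPositions_nonneg ls q.1 (List.of_mem_zip hq).1)
      simpa [Prod.map] using this
    by_cases h : pvIsHttp l
    · simp only [h, if_true]
      cases us with
      | nil => simp [pvGo, h, ← ih []]
      | cons u us' =>
        simp only [List.zip_cons_cons, List.foldl_cons, Int.toNat_zero, List.set, pvGo, h,
          if_true]
        rw [← ih us']
        have := foldl_set_shift ((pvHttpPositions ls).zip us') u ls
          (fun q hq => httpPositions_nonneg ls q.1 (List.of_mem_zip hq).1)
        rw [List.zip_map_left]
        simpa [Prod.map] using this
    · simp only [h, Bool.false_eq_true, if_false, hshift us, pvGo, ih us]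

lemma foldA_eq_go (tv_urls : List String) (lines : List String) (acc : List String) (i : Nat) :
    (lines.foldl (fun (st : List String × Int) line =>
      if PySem.Str.startswith (PySem.Str.strip line) "http" ∧ st.2 < (tv_urls.length : Int) then
        (st.1 ++ [(PySem.List.pyGet? tv_urls st.2).getD ""], st.2 + 1)
      else
        (st.1 ++ [line], st.2)) (acc, (i : Int))).1
      = acc ++ pvGo tv_urls lines (tv_urls.drop i) := by
  induction lines generalizing acc i with
  | nil => simp [pvGo]
  | cons l ls ih =>
    simp only [List.foldl_cons]
    by_cases hh : pvIsHttp l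
    · by_cases hlt : i < tv_urls.length
      · have hc : PySem.Str.startswith (PySem.Str.strip l) "http" ∧ (i : Int) < (tv_urls.length : Int) := by
          exact ⟨hh, by exact_mod_cast hlt⟩
        rw [if_pos hc]
        have hget : (PySem.List.pyGet? tv_urls (i : Int)).getD "" = tv_urls[i] := by
          simp [PySem.List.pyGet?_natCast, List.getElem?_eq_getElem hlt]
        have hdrop : tv_urls.drop i = tv_urls[i] :: tv_urls.drop (i + 1) :=
          List.drop_eq_getElem_cons hlt
        have : ((i : Int) + 1) = ((i + 1 : Nat) : Int) := by push_cast; ring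
        rw [hget, this, ih _ (i + 1), hdrop]
        simp [pvGo, hh]
      · have hc : ¬ (PySem.Str.startswith (PySem.Str.strip l) "http" ∧ (i : Int) < (tv_urls.length : Int)) := by
          intro h; exact hlt (by exact_mod_cast h.2)
        rw [if_neg hc, ih _ i]
        have hdrop : tv_urls.drop i = [] := List.drop_eq_nil_of_le (by omega)
        simp [pvGo, hh, hdrop]
    · have hc : ¬ (PySem.Str.startswith (PySem.Str.strip l) "http" ∧ (i : Int) < (tv_urls.length : Int)) := by
        intro h; exact hh h.1
      rw [if_neg hc, ih _ i]
      simp [pvGo, hh]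

-- ===== VERDICT (by name: the statement is the Claim_ definition above) =====
theorem replace_urls_in_tv_section_spec : Claim_equal_replace_urls_in_tv_section := by
  intro lines tv_urls _
  show replace_urls_in_tv_section lines tv_urls = replace_urls_in_tv_section_alt lines tv_urls
  unfold replace_urls_in_tv_section replace_urls_in_tv_section_alt
  have := foldA_eq_go tv_urls lines [] 0
  simp only [Nat.cast_zero, List.drop_zero, List.nil_append] at this
  rw [this, alt_eq_go]
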